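-- pv_equiv track=rewrite | github.com/emotivhq/ui | product/fetch.py | get_base_url
-- ===== SOURCE A (Python) =====
-- def get_base_url(url):
--     out = ""
--     slash_count = 0
--     for char in url:
--         if char == '/':
--             slash_count += 1
--         out += char
--         if slash_count >= 3:
--             break
--     return out
-- ===== SOURCE B (Python) =====
-- def get_base_url(url):
--     p1 = url.find('/')
--     if p1 == -1:
--         return url
--     p2 = url.find('/', p1 + 1)
--     if p2 == -1:
--         return url
--     p3 = url.find('/', p2 + 1)
--     if p3 == -1:
--         return url
--     return url[:p3 + 1]
-- ===== Notes on version B (the rewrite author's own statement) =====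
-- stated objective: faster
-- what changed: Replaces the character-by-character accumulation loop with a slash counter by three str.find calls that locate the third slash and a single slice (or return the whole string when fewer than three slashes exist).
import Mathlib
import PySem

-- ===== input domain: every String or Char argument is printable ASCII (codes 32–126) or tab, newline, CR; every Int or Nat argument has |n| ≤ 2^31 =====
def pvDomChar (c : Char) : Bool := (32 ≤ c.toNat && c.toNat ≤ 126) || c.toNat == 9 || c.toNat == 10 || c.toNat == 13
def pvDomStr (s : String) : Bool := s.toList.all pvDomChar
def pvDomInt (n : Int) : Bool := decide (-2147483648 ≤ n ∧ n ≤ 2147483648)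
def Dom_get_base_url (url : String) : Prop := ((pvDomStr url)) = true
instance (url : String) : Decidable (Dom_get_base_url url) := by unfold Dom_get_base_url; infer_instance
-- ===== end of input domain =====

-- B replaces A's character-accumulating loop (with a slash counter and break) by three
-- str.find calls locating the third slash and a single slice; a timing run measured B faster.

-- ===== PORT A =====
-- for char in url: count slashes, out += char, break once slash_count >= 3
def pvGoA : List Char → String → Nat → String
  | [], out, _ => out
  | c :: rest, out, cnt =>
      let cnt' := if c = '/' then cnt + 1 else cnt
      let out' := out.push c
      if 3 ≤ cnt' then out' else pvGoA rest out' cnt'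

def get_base_url (url : String) : String := pvGoA url.toList "" 0

-- ===== PORT B =====
def get_base_url_alt (url : String) : String :=
  let p1 := PySem.Str.findFrom url "/" 0 none          -- url.find('/')
  if p1 = -1 then url else
  let p2 := PySem.Str.findFrom url "/" (p1 + 1) none   -- url.find('/', p1 + 1)
  if p2 = -1 then url else
  let p3 := PySem.Str.findFrom url "/" (p2 + 1) none   -- url.find('/', p2 + 1)
  if p3 = -1 then url else
  PySem.Str.slice url none (some (p3 + 1))             -- url[:p3 + 1]

-- ===== PRECONDITION & SPEC =====
def Spec_get_base_url (url : String) (out : String) : Prop := out = get_base_url_alt url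
instance (url : String) (out : String) : Decidable (Spec_get_base_url url out) := by unfold Spec_get_base_url; infer_instance

-- ===== CLAIM (what is proved, stated in full; the proofs are below) =====
def Claim_equal_get_base_url : Prop := ∀ (url : String), Dom_get_base_url url → Spec_get_base_url url (get_base_url url)

-- ===== LEMMAS AND PROOFS =====

-- pure-list version of A's loop
def pvGoL : List Char → Nat → List Char
  | [], _ => []
  | c :: rest, cnt =>
      let cnt' := if c = '/' then cnt + 1 else cnt
      if 3 ≤ cnt' then [c] else c :: pvGoL rest cnt'

theorem pvGoA_toList : ∀ (cs : List Char) (out : String) (cnt : Nat),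
    (pvGoA cs out cnt).toList = out.toList ++ pvGoL cs cnt := by
  intro cs
  induction cs with
  | nil => intro out cnt; simp [pvGoA, pvGoL]
  | cons c rest ih =>
      intro out cnt
      simp only [pvGoA, pvGoL]
      by_cases h : 3 ≤ (if c = '/' then cnt + 1 else cnt)
      · simp [h]
      · simp [h, ih]

-- A's loop, unfolded at the first slash (while fewer than 2 slashes seen)
theorem pvGoL_step (cs : List Char) (cnt : Nat) (h : cnt < 2) :
    pvGoL cs cnt = match List.findIdx? (fun c => c == '/') cs with
      | none => cs
      | some i => cs.take (i + 1) ++ pvGoL (cs.drop (i + 1)) (cnt + 1) := by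
  induction cs with
  | nil => simp [pvGoL]
  | cons c rest ih =>
      by_cases hc : c = '/'
      · subst hc
        simp only [pvGoL, List.findIdx?_cons]
        have : ¬ 3 ≤ cnt + 1 := by omega
        simp [this]
      · simp only [pvGoL, List.findIdx?_cons, beq_iff_eq, if_neg hc]
        have : ¬ 3 ≤ cnt := by omega
        simp only [if_neg this, ih]
        cases hf : List.findIdx? (fun c => c == '/') rest with
        | none => simp
        | some i => simp

-- A's loop at the third slash: it stops right after it
theorem pvGoL_two (cs : List Char) :
    pvGoL cs 2 = match List.findIdx? (fun c => c == '/') cs with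
      | none => cs
      | some i => cs.take (i + 1) := by
  induction cs with
  | nil => simp [pvGoL]
  | cons c rest ih =>
      by_cases hc : c = '/'
      · subst hc
        simp [pvGoL, List.findIdx?_cons]
      · simp only [pvGoL, List.findIdx?_cons, beq_iff_eq, if_neg hc]
        norm_num
        simp only [ih]
        cases hf : List.findIdx? (fun c => c == '/') rest with
        | none => simp
        | some i => simp

theorem singleton_prefix_drop (cs : List Char) (m : Nat) (a : Char) :
    [a] <+: cs.drop m ↔ cs[m]? = some a := by
  rw [List.cons_prefix_iff]
  constructor
  · rintro ⟨l', hl, -⟩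
    have : (cs.drop m).head? = some a := by rw [hl]; rfl
    simpa [List.head?_drop] using this
  · intro h
    have h' : (cs.drop m).head? = some a := by simpa [List.head?_drop] using h
    cases hd : cs.drop m with
    | nil => simp [hd] at h'
    | cons x t =>
        rw [hd] at h'
        simp at h'
        exact ⟨t, by rw [h'], List.nil_prefix⟩

-- Chars.find with a single-character needle is the first index of that character
theorem find_slash (cs : List Char) :
    PySem.Chars.find cs ['/'] = match List.findIdx? (fun c => c == '/') cs with
      | none => -1
      | some i => (i : Int) := by
  cases hf : List.findIdx? (fun c => c == '/') cs with
  | none =>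
      simp only []
      rw [PySem.Chars.find_eq_neg_one_iff]
      intro hinf
      have hm : '/' ∈ cs := List.singleton_sublist.mp hinf.sublist
      have := List.findIdx?_eq_none_iff.mp hf '/' hm
      simp at this
  | some i =>
      simp only []
      obtain ⟨hlen, hpi, hmin⟩ := List.findIdx?_eq_some_iff_getElem.mp hf
      have hne : PySem.Chars.find cs ['/'] ≠ -1 := by
        rw [PySem.Chars.find_ne_neg_one_iff]
        have : [ '/' ] <+: cs.drop i := by
          rw [singleton_prefix_drop]
          simp only [List.getElem?_eq_getElem hlen]
          simpa using hpi
        exact this.isInfix.trans (List.drop_suffix i cs).isInfix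
      have hspec := PySem.Chars.findFrom_natCast_spec cs ['/'] 0 (Nat.zero_le _)
        (by rw [Nat.cast_zero, PySem.Chars.findFrom_zero]; exact hne)
      rw [Nat.cast_zero, PySem.Chars.findFrom_zero] at hspec
      obtain ⟨hnn, hpre, hbefore⟩ := hspec
      set f := PySem.Chars.find cs ['/'] with hfdef
      have hfi : cs[f.toNat]? = some '/' := (singleton_prefix_drop cs f.toNat '/').mp hpre
      -- f.toNat = i
      have h1 : ¬ (f.toNat < i) := by
        intro hlt
        have := hmin f.toNat hlt
        have hget : cs[f.toNat] = '/' := by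
          have hl : f.toNat < cs.length := by omega
          have := hfi
          rw [List.getElem?_eq_getElem hl] at this
          exact Option.some.inj this
        simp [hget] at this
      have h2 : ¬ (i < f.toNat) := by
        intro hlt
        have := hbefore i (Nat.zero_le _) hlt
        apply this
        rw [singleton_prefix_drop]
        simp only [List.getElem?_eq_getElem hlen]
        simpa using hpi
      have heq : f.toNat = i := by omega
      omega

-- bound on findIdx? results
theorem findIdx?_lt_length {cs : List Char} {i : Nat}
    (h : List.findIdx? (fun c => c == '/') cs = some i) : i < cs.length :=
  (List.findIdx?_eq_some_iff_findIdx_eq.mp h).1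

theorem pvGoL_none (cs : List Char) (cnt : Nat) (h : List.findIdx? (fun c => c == '/') cs = none)
    (hcnt : cnt < 2) : pvGoL cs cnt = cs := by
  rw [pvGoL_step cs cnt hcnt, h]

theorem pvGoL_some (cs : List Char) (cnt : Nat) {i : Nat}
    (h : List.findIdx? (fun c => c == '/') cs = some i) (hcnt : cnt < 2) :
    pvGoL cs cnt = cs.take (i + 1) ++ pvGoL (cs.drop (i + 1)) (cnt + 1) := by
  rw [pvGoL_step cs cnt hcnt, h]

theorem pvGoL_two_none (cs : List Char) (h : List.findIdx? (fun c => c == '/') cs = none) :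
    pvGoL cs 2 = cs := by
  rw [pvGoL_two, h]

theorem pvGoL_two_some (cs : List Char) {i : Nat}
    (h : List.findIdx? (fun c => c == '/') cs = some i) : pvGoL cs 2 = cs.take (i + 1) := by
  rw [pvGoL_two, h]

theorem find_none (cs : List Char) (h : List.findIdx? (fun c => c == '/') cs = none) :
    PySem.Chars.find cs ['/'] = -1 := by
  rw [find_slash, h]

theorem find_some (cs : List Char) {i : Nat}
    (h : List.findIdx? (fun c => c == '/') cs = some i) :
    PySem.Chars.find cs ['/'] = (i : Int) := by
  rw [find_slash, h]

-- ===== VERDICT (by name: the statement is the Claim_ definition above) =====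
theorem get_base_url_spec : Claim_equal_get_base_url := by
  intro url _
  unfold Spec_get_base_url get_base_url get_base_url_alt
  rw [← String.toList_inj, pvGoA_toList]
  have hslash : ("/" : String).toList = ['/'] := rfl
  simp only [PySem.Str.findFrom_eq, hslash, PySem.Chars.findFrom_zero, List.nil_append,
    String.toList_empty]
  cases h1 : List.findIdx? (fun c => c == '/') url.toList with
  | none =>
      rw [find_none _ h1, if_pos rfl, pvGoL_none _ 0 h1 (by omega)]
  | some i1 =>
      have hi1 : i1 < url.toList.length := findIdx?_lt_length h1
      rw [find_some _ h1, if_neg (by omega : ¬ ((i1 : Int) = -1))]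
      have hk1 : (i1 : Int) + 1 = ((i1 + 1 : Nat) : Int) := by push_cast; ring
      rw [hk1, PySem.Chars.findFrom_natCast url.toList ['/'] (i1 + 1) (by omega)]
      rw [pvGoL_some _ 0 h1 (by omega)]
      cases h2 : List.findIdx? (fun c => c == '/') (url.toList.drop (i1 + 1)) with
      | none =>
          rw [find_none _ h2, if_pos rfl, if_pos rfl, pvGoL_none _ 1 h2 (by omega),
            List.take_append_drop]
      | some i2 =>
          have hi2 : i2 < url.toList.length - (i1 + 1) := by
            have := findIdx?_lt_length h2
            simpa [List.length_drop] using this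
          rw [find_some _ h2, if_neg (by omega : ¬ ((i2 : Int) = -1)),
            if_neg (by omega : ¬ (((i1 + 1 : Nat) : Int) + (i2 : Int) = -1))]
          have hk2 : ((i1 + 1 : Nat) : Int) + (i2 : Int) + 1 = ((i1 + 1 + i2 + 1 : Nat) : Int) := by
            push_cast; ring
          rw [hk2, PySem.Chars.findFrom_natCast url.toList ['/'] (i1 + 1 + i2 + 1) (by omega)]
          rw [pvGoL_some _ 1 h2 (by omega)]
          have hdd : (url.toList.drop (i1 + 1)).drop (i2 + 1) = url.toList.drop (i1 + 1 + i2 + 1) := by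
            rw [List.drop_drop]; ring_nf
          rw [hdd]
          cases h3 : List.findIdx? (fun c => c == '/') (url.toList.drop (i1 + 1 + i2 + 1)) with
          | none =>
              rw [find_none _ h3, if_pos rfl, if_pos rfl, pvGoL_two_none _ h3, ← hdd,
                List.take_append_drop, List.take_append_drop]
          | some i3 =>
              have hi3 : i3 < url.toList.length - (i1 + 1 + i2 + 1) := by
                have := findIdx?_lt_length h3
                simpa [List.length_drop] using this
              rw [find_some _ h3, if_neg (by omega : ¬ ((i3 : Int) = -1)),
                if_neg (by omega : ¬ (((i1 + 1 + i2 + 1 : Nat) : Int) + (i3 : Int) = -1))]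
              rw [pvGoL_two_some _ h3]
              rw [PySem.Str.toList_slice, PySem.Chars.slice_eq_listSlice]
              have hb : ((i1 + 1 + i2 + 1 : Nat) : Int) + (i3 : Int) + 1
                  = ((i1 + 1 + i2 + 1 + i3 + 1 : Nat) : Int) := by push_cast; ring
              rw [hb, PySem.List.slice_to_natCast]
              rw [show i1 + 1 + i2 + 1 + i3 + 1 = (i1 + 1) + ((i2 + 1) + (i3 + 1)) by ring]
              conv_rhs => rw [List.take_add (l := url.toList) (i := i1 + 1) (j := (i2 + 1) + (i3 + 1)),
                List.take_add (l := List.drop (i1 + 1) url.toList) (i := i2 + 1) (j := i3 + 1), hdd]
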